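-- pv_equiv track=rewrite | github.com/bhavik1611/ipl-analytics-engine | src/scripts/team_venue_matchup_analysis.py | _resolve_franchise_venue
-- ===== SOURCE A (Python) =====
-- def _resolve_franchise_venue(query: str, venue_catalog: list[str]) -> str:
--     """Pick a single canonical venue string from a user substring."""
--
--     q = query.strip().lower()
--     if not q:
--         raise ValueError("venue query is empty")
--     exact = [v for v in venue_catalog if v.lower() == q]
--     if len(exact) == 1:
--         return exact[0]
--     starts = [v for v in venue_catalog if v.lower().startswith(q)]
--     if len(starts) == 1:
--         return starts[0]
--     subs = sorted({v for v in venue_catalog if q in v.lower()})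
--     if not subs:
--         raise ValueError(f"No venue contains or matches {query!r}")
--     if len(subs) == 1:
--         return subs[0]
--     raise ValueError(f"Ambiguous venue {query!r}; candidates: {subs[:12]}")
-- ===== SOURCE B (Python) =====
-- def _resolve_franchise_venue(query: str, venue_catalog: list[str]) -> str:
--     """Pick a single canonical venue string from a user substring.
--
--     Single classification pass: one `find` per venue assigns each matching
--     venue to exactly one disjoint bucket (exact / proper prefix / interior
--     substring); the decision then reads bucket sizes."""
--     q = query.strip().lower()
--     if not q:
--         raise ValueError("venue query is empty")
--     g0, g1, g2 = [], [], []
--     for v in venue_catalog: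
--         vl = v.lower()
--         i = vl.find(q)
--         if i < 0:
--             continue
--         if len(vl) == len(q):
--             g0.append(v)          # exact match
--         elif i == 0:
--             g1.append(v)          # proper prefix match
--         else:
--             g2.append(v)          # interior substring match
--     if len(g0) == 1:
--         return g0[0]
--     if len(g0) + len(g1) == 1:    # unique prefix match
--         return (g0 + g1)[0]
--     subs = sorted(set(g0 + g1 + g2))
--     if not subs:
--         raise ValueError(f"No venue contains or matches {query!r}")
--     if len(subs) == 1:
--         return subs[0]
--     raise ValueError(f"Ambiguous venue {query!r}; candidates: {subs[:12]}")
-- ===== Notes on version B (the rewrite author's own statement) =====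
-- stated objective: alternative
-- what changed: Instead of A's three overlapping comprehension scans (equality, startswith, substring tests), B makes one classification pass that runs a single find() per venue and partitions matches into three disjoint buckets (exact / proper-prefix / interior-substring), then decides from bucket sizes: unique exact = g0, unique prefix = g0+g1, substring candidates = set(g0+g1+g2).
import Mathlib
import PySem

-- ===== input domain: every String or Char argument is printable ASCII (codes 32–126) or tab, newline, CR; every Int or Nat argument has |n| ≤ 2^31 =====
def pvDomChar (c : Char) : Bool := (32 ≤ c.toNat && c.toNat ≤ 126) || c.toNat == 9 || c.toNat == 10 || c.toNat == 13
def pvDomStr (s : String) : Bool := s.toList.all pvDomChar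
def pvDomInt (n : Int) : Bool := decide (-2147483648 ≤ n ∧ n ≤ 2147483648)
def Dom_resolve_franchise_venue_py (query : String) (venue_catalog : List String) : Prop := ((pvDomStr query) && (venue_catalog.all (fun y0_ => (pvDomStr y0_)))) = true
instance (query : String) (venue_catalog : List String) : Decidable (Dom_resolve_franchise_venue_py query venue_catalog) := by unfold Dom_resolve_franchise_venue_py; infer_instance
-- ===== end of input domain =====

-- B replaces A's three overlapping catalog scans by a single find()-based classification pass into three disjoint buckets (exact / proper prefix / interior substring); equal return values on Pre_ (where A returns; A raises outside Pre_).


-- ===== PORT A =====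
-- Transliteration of A: three list/set comprehensions over venue_catalog, then the cascade.
-- On the three 'raise ValueError' paths (excluded by Pre_) the port returns "".
def resolve_franchise_venue_py (query : String) (venue_catalog : List String) : String :=
  let q := PySem.Str.lower (PySem.Str.strip query)
  if q = "" then ""  -- raise ValueError("venue query is empty")
  else
    let exact := venue_catalog.filter (fun v => PySem.Str.lower v == q)
    if exact.length = 1 then exact.headD ""  -- exact[0]
    else
      let starts := venue_catalog.filter (fun v => PySem.Str.startswith (PySem.Str.lower v) q)
      if starts.length = 1 then starts.headD ""  -- starts[0]
      else
        let subs := PySem.List.sorted (PySem.Set.ofList (venue_catalog.filter (fun v => PySem.Str.isIn q (PySem.Str.lower v)))) (fun x => x) false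
        if subs = [] then ""  -- raise ValueError (no match)
        else if subs.length = 1 then subs.headD ""  -- subs[0]
        else ""  -- raise ValueError (ambiguous)

-- ===== PORT B =====
-- Transliteration of B: one classification pass (a single find per venue) into three
-- disjoint buckets g0 (exact) / g1 (proper prefix) / g2 (interior substring); the
-- decision then reads bucket sizes.
def resolve_franchise_venue_py_alt (query : String) (venue_catalog : List String) : String :=
  let q := PySem.Str.lower (PySem.Str.strip query)
  if q = "" then ""  -- raise ValueError("venue query is empty")
  else
    let g := venue_catalog.foldl
      (fun (acc : List String × List String × List String) v =>
        let vl := PySem.Str.lower v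
        let i := PySem.Str.find vl q
        if i < 0 then acc  -- continue
        else if PySem.Str.len vl = PySem.Str.len q then (acc.1 ++ [v], acc.2.1, acc.2.2)
        else if i = 0 then (acc.1, acc.2.1 ++ [v], acc.2.2)
        else (acc.1, acc.2.1, acc.2.2 ++ [v]))
      ([], [], [])
    if g.1.length = 1 then g.1.headD ""  -- g0[0]
    else if g.1.length + g.2.1.length = 1 then (g.1 ++ g.2.1).headD ""  -- (g0 + g1)[0]
    else
      let subs := PySem.List.sorted (PySem.Set.ofList (g.1 ++ g.2.1 ++ g.2.2)) (fun x => x) false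
      if subs = [] then ""  -- raise ValueError (no match)
      else if subs.length = 1 then subs.headD ""  -- subs[0]
      else ""  -- raise ValueError (ambiguous)

-- ===== PRECONDITION & SPEC =====
-- Pre_ = exactly the inputs where Python A returns (does not raise): non-empty stripped
-- lowercased query and one of the three cascade stages has a unique candidate.
def Pre_resolve_franchise_venue_py (query : String) (venue_catalog : List String) : Prop :=
  let q := PySem.Str.lower (PySem.Str.strip query)
  q ≠ "" ∧
    ((venue_catalog.filter (fun v => PySem.Str.lower v == q)).length = 1 ∨
     (venue_catalog.filter (fun v => PySem.Str.startswith (PySem.Str.lower v) q)).length = 1 ∨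
     (PySem.Set.ofList (venue_catalog.filter (fun v => PySem.Str.isIn q (PySem.Str.lower v)))).length = 1)
instance (query : String) (venue_catalog : List String) : Decidable (Pre_resolve_franchise_venue_py query venue_catalog) := by unfold Pre_resolve_franchise_venue_py; infer_instance

def pvWitness_resolve_franchise_venue_py : String × List String := ("eden", ["Eden Gardens", "Wankhede Stadium"])

def Spec_resolve_franchise_venue_py (query : String) (venue_catalog : List String) (out : String) : Prop := out = resolve_franchise_venue_py_alt query venue_catalog
instance (query : String) (venue_catalog : List String) (out : String) : Decidable (Spec_resolve_franchise_venue_py query venue_catalog out) := by unfold Spec_resolve_franchise_venue_py; infer_instance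

-- ===== CLAIM (what is proved, stated in full; the proofs are below) =====
def Claim_equal_resolve_franchise_venue_py : Prop := ∀ (query : String) (venue_catalog : List String), Dom_resolve_franchise_venue_py query venue_catalog → Pre_resolve_franchise_venue_py query venue_catalog → Spec_resolve_franchise_venue_py query venue_catalog (resolve_franchise_venue_py query venue_catalog)

-- ===== LEMMAS AND PROOFS =====
set_option maxHeartbeats 1000000

-- find s t = 0 exactly when t is a prefix of s.
theorem find_eq_zero_iff_prefix (s t : List Char) :
    PySem.Chars.find s t = 0 ↔ t <+: s := by
  constructor
  · intro h
    have h0 : (0 : Int) ≤ PySem.Chars.find s t := by omega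
    have := (PySem.Chars.find_spec h0).1
    simpa [h] using this
  · intro hp
    have h0 : (0 : Int) ≤ PySem.Chars.find s t :=
      (PySem.Chars.find_nonneg_iff s t).mpr hp.isInfix
    by_contra hne
    have hpos : 0 < (PySem.Chars.find s t).toNat := by omega
    exact (PySem.Chars.find_spec h0).2 0 hpos (by simpa using hp)

-- Nonnegative find with equal lengths means the strings are equal.
theorem find_len_eq_iff (s t : List Char) :
    (0 ≤ PySem.Chars.find s t ∧ s.length = t.length) ↔ s = t := by
  constructor
  · rintro ⟨h0, hl⟩
    have hi : t <:+: s := (PySem.Chars.find_nonneg_iff s t).mp h0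
    exact (hi.eq_of_length hl.symm).symm
  · rintro rfl
    exact ⟨(PySem.Chars.find_nonneg_iff s s).mpr (List.infix_refl s), rfl⟩

theorem str_eq_iff_toList (a b : String) : a = b ↔ a.toList = b.toList :=
  ⟨fun h => by rw [h], fun h => by simpa using congrArg String.ofList h⟩

-- Pointwise: bucket-g0 membership is A's exact-match test.
theorem exact_iff (q v : String) :
    (¬ PySem.Str.find (PySem.Str.lower v) q < 0 ∧ PySem.Str.len (PySem.Str.lower v) = PySem.Str.len q) ↔ PySem.Str.lower v = q := by
  rw [str_eq_iff_toList, ← find_len_eq_iff]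
  simp [not_lt]

-- Pointwise: A's startswith test holds exactly when the venue lands in bucket g0 or g1.
theorem startswith_iff_g01 (q v : String) :
    PySem.Str.startswith (PySem.Str.lower v) q = true ↔
      ((¬ PySem.Str.find (PySem.Str.lower v) q < 0 ∧ PySem.Str.len (PySem.Str.lower v) = PySem.Str.len q) ∨
       (¬ PySem.Str.find (PySem.Str.lower v) q < 0 ∧ ¬ PySem.Str.len (PySem.Str.lower v) = PySem.Str.len q ∧ PySem.Str.find (PySem.Str.lower v) q = 0)) := by
  have hsw : PySem.Str.startswith (PySem.Str.lower v) q = true ↔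
      PySem.Str.find (PySem.Str.lower v) q = 0 := by
    simp [PySem.Chars.startswith_iff, ← find_eq_zero_iff_prefix]
  have hex := exact_iff q v
  rw [hsw]
  constructor
  · intro h0
    by_cases hl : PySem.Str.len (PySem.Str.lower v) = PySem.Str.len q
    · exact Or.inl ⟨by omega, hl⟩
    · exact Or.inr ⟨by omega, hl, h0⟩
  · rintro (⟨h0, hl⟩ | ⟨_, _, h0⟩)
    · have hq : PySem.Str.lower v = q := hex.mp ⟨h0, hl⟩
      rw [hq]
      have : PySem.Str.startswith q q = true := by
        simp [PySem.Chars.startswith_iff]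
      rw [hq] at hsw
      exact hsw.mp this
    · exact h0

-- Pointwise: A's substring test holds exactly when the venue lands in some bucket.
theorem isIn_iff_g012 (q v : String) :
    PySem.Str.isIn q (PySem.Str.lower v) = true ↔
      ¬ PySem.Str.find (PySem.Str.lower v) q < 0 := by
  rw [PySem.Str.isIn_iff_infix, not_lt]
  simpa using (PySem.Chars.find_nonneg_iff (PySem.Str.lower v).toList q.toList).symm

-- B's classification fold computes the three disjoint filters (appended to the state).
theorem classify_fold_eq (q : String) (vc : List String) (e s u : List String) :
    vc.foldl
      (fun (acc : List String × List String × List String) v =>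
        let vl := PySem.Str.lower v
        let i := PySem.Str.find vl q
        if i < 0 then acc
        else if PySem.Str.len vl = PySem.Str.len q then (acc.1 ++ [v], acc.2.1, acc.2.2)
        else if i = 0 then (acc.1, acc.2.1 ++ [v], acc.2.2)
        else (acc.1, acc.2.1, acc.2.2 ++ [v]))
      (e, s, u)
    = (e ++ vc.filter (fun v => decide (¬ PySem.Str.find (PySem.Str.lower v) q < 0 ∧ PySem.Str.len (PySem.Str.lower v) = PySem.Str.len q)),
       s ++ vc.filter (fun v => decide (¬ PySem.Str.find (PySem.Str.lower v) q < 0 ∧ ¬ PySem.Str.len (PySem.Str.lower v) = PySem.Str.len q ∧ PySem.Str.find (PySem.Str.lower v) q = 0)),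
       u ++ vc.filter (fun v => decide (¬ PySem.Str.find (PySem.Str.lower v) q < 0 ∧ ¬ PySem.Str.len (PySem.Str.lower v) = PySem.Str.len q ∧ ¬ PySem.Str.find (PySem.Str.lower v) q = 0))) := by
  induction vc generalizing e s u with
  | nil => simp
  | cons v t ih =>
    simp only [List.foldl_cons, List.filter_cons]
    rw [ih]
    by_cases h1 : PySem.Str.find (PySem.Str.lower v) q < 0 <;>
      by_cases h2 : PySem.Str.len (PySem.Str.lower v) = PySem.Str.len q <;>
      by_cases h3 : PySem.Str.find (PySem.Str.lower v) q = 0 <;>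
      simp_all <;> simp [not_lt.mpr h1]

-- Bucket g0 is A's exact filter.
theorem g0_eq_exact (q : String) (vc : List String) :
    vc.filter (fun v => decide (¬ PySem.Str.find (PySem.Str.lower v) q < 0 ∧ PySem.Str.len (PySem.Str.lower v) = PySem.Str.len q))
      = vc.filter (fun v => PySem.Str.lower v == q) := by
  apply List.filter_congr
  intro v _
  rw [Bool.eq_iff_iff]
  simp only [decide_eq_true_eq, beq_iff_eq]
  exact exact_iff q v

-- Length of A's starts filter = |g0| + |g1|.
theorem starts_length (q : String) (vc : List String) :
    (vc.filter (fun v => PySem.Str.startswith (PySem.Str.lower v) q)).length =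
      (vc.filter (fun v => decide (¬ PySem.Str.find (PySem.Str.lower v) q < 0 ∧ PySem.Str.len (PySem.Str.lower v) = PySem.Str.len q))).length +
      (vc.filter (fun v => decide (¬ PySem.Str.find (PySem.Str.lower v) q < 0 ∧ ¬ PySem.Str.len (PySem.Str.lower v) = PySem.Str.len q ∧ PySem.Str.find (PySem.Str.lower v) q = 0))).length := by
  induction vc with
  | nil => simp
  | cons v t ih =>
    simp only [List.filter_cons]
    have hd := startswith_iff_g01 q v
    by_cases hA : (¬ PySem.Str.find (PySem.Str.lower v) q < 0 ∧ PySem.Str.len (PySem.Str.lower v) = PySem.Str.len q)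
    · have hB : ¬ (¬ PySem.Str.find (PySem.Str.lower v) q < 0 ∧ ¬ PySem.Str.len (PySem.Str.lower v) = PySem.Str.len q ∧ PySem.Str.find (PySem.Str.lower v) q = 0) :=
        fun hB => hB.2.1 hA.2
      rw [if_pos (hd.mpr (Or.inl hA)), if_pos (decide_eq_true hA),
        if_neg (fun h => hB (of_decide_eq_true h))]
      simp only [List.length_cons]
      omega
    · by_cases hB : (¬ PySem.Str.find (PySem.Str.lower v) q < 0 ∧ ¬ PySem.Str.len (PySem.Str.lower v) = PySem.Str.len q ∧ PySem.Str.find (PySem.Str.lower v) q = 0)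
      · rw [if_pos (hd.mpr (Or.inr hB)), if_neg (fun h => hA (of_decide_eq_true h)),
          if_pos (decide_eq_true hB)]
        simp only [List.length_cons]
        omega
      · have hs : ¬ (PySem.Str.startswith (PySem.Str.lower v) q = true) := by
          intro h
          rcases hd.mp h with h' | h'
          · exact hA h'
          · exact hB h'
        rw [if_neg hs, if_neg (fun h => hA (of_decide_eq_true h)),
          if_neg (fun h => hB (of_decide_eq_true h))]
        omega

-- If g0 is empty, A's starts filter IS g1.
theorem starts_eq_g1_of_g0_nil (q : String) (vc : List String)
    (h0 : vc.filter (fun v => decide (¬ PySem.Str.find (PySem.Str.lower v) q < 0 ∧ PySem.Str.len (PySem.Str.lower v) = PySem.Str.len q)) = []) :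
    vc.filter (fun v => PySem.Str.startswith (PySem.Str.lower v) q) =
      vc.filter (fun v => decide (¬ PySem.Str.find (PySem.Str.lower v) q < 0 ∧ ¬ PySem.Str.len (PySem.Str.lower v) = PySem.Str.len q ∧ PySem.Str.find (PySem.Str.lower v) q = 0)) := by
  apply List.filter_congr
  intro v hv
  have hno := List.filter_eq_nil_iff.mp h0 v hv
  rw [Bool.eq_iff_iff]
  simp only [decide_eq_true_eq] at hno ⊢
  rw [startswith_iff_g01]
  tauto

-- The sorted deduplicated substring candidates agree between A and B.
theorem subs_eq (q : String) (vc : List String) :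
    PySem.List.sorted (PySem.Set.ofList
        ((vc.filter (fun v => decide (¬ PySem.Str.find (PySem.Str.lower v) q < 0 ∧ PySem.Str.len (PySem.Str.lower v) = PySem.Str.len q)))
          ++ (vc.filter (fun v => decide (¬ PySem.Str.find (PySem.Str.lower v) q < 0 ∧ ¬ PySem.Str.len (PySem.Str.lower v) = PySem.Str.len q ∧ PySem.Str.find (PySem.Str.lower v) q = 0)))
          ++ (vc.filter (fun v => decide (¬ PySem.Str.find (PySem.Str.lower v) q < 0 ∧ ¬ PySem.Str.len (PySem.Str.lower v) = PySem.Str.len q ∧ ¬ PySem.Str.find (PySem.Str.lower v) q = 0))))) (fun x => x) false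
    = PySem.List.sorted (PySem.Set.ofList (vc.filter (fun v => PySem.Str.isIn q (PySem.Str.lower v)))) (fun x => x) false := by
  apply PySem.List.sorted_eq_sorted_of_perm _ _ _ (fun a b h => h)
  rw [List.perm_ext_iff_of_nodup (PySem.Set.nodup_ofList _) (PySem.Set.nodup_ofList _)]
  intro v
  simp only [PySem.Set.mem_ofList, List.mem_append, List.mem_filter, decide_eq_true_eq]
  constructor
  · rintro ((⟨hm, hc⟩ | ⟨hm, hc⟩) | ⟨hm, hc⟩) <;>
      exact ⟨hm, (isIn_iff_g012 q v).mpr hc.1⟩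
  · rintro ⟨hm, hc⟩
    have h0 := (isIn_iff_g012 q v).mp hc
    by_cases h2 : PySem.Str.len (PySem.Str.lower v) = PySem.Str.len q
    · exact Or.inl (Or.inl ⟨hm, h0, h2⟩)
    · by_cases h3 : PySem.Str.find (PySem.Str.lower v) q = 0
      · exact Or.inl (Or.inr ⟨hm, h0, h2, h3⟩)
      · exact Or.inr ⟨hm, h0, h2, h3⟩

-- A and B return the same string on every input (the Pre_/Dom_ hypotheses are not needed
-- for the return-value equality: the raise paths of both map to "").
theorem resolve_eq (query : String) (vc : List String) :
    resolve_franchise_venue_py query vc = resolve_franchise_venue_py_alt query vc := by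
  unfold resolve_franchise_venue_py resolve_franchise_venue_py_alt
  simp only [classify_fold_eq, List.nil_append]
  set q := PySem.Str.lower (PySem.Str.strip query) with hq
  by_cases hqe : q = ""
  · simp [hqe]
  · simp only [hqe, if_false]
    rw [g0_eq_exact]
    have hlen := starts_length q vc
    rw [g0_eq_exact] at hlen
    by_cases he : (vc.filter (fun v => PySem.Str.lower v == q)).length = 1
    · rw [if_pos he, if_pos he]
    · rw [if_neg he, if_neg he]
      by_cases hs : (vc.filter (fun v => PySem.Str.startswith (PySem.Str.lower v) q)).length = 1
      · have h01 : (vc.filter (fun v => PySem.Str.lower v == q)).length +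
            (vc.filter (fun v => decide (¬ PySem.Str.find (PySem.Str.lower v) q < 0 ∧ ¬ PySem.Str.len (PySem.Str.lower v) = PySem.Str.len q ∧ PySem.Str.find (PySem.Str.lower v) q = 0))).length = 1 := by
          omega
        have hg0 : vc.filter (fun v => PySem.Str.lower v == q) = [] :=
          List.length_eq_zero_iff.mp (by omega)
        rw [if_pos hs, if_pos h01,
          starts_eq_g1_of_g0_nil q vc ((g0_eq_exact q vc).trans hg0), hg0, List.nil_append]
      · have h01 : ¬ ((vc.filter (fun v => PySem.Str.lower v == q)).length +
            (vc.filter (fun v => decide (¬ PySem.Str.find (PySem.Str.lower v) q < 0 ∧ ¬ PySem.Str.len (PySem.Str.lower v) = PySem.Str.len q ∧ PySem.Str.find (PySem.Str.lower v) q = 0))).length = 1) := by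
          omega
        rw [if_neg hs, if_neg h01, ← g0_eq_exact q vc, subs_eq]

-- ===== VERDICT (by name: the statement is the Claim_ definition above) =====
theorem resolve_franchise_venue_py_spec : Claim_equal_resolve_franchise_venue_py := by
  intro query vc _ _
  unfold Spec_resolve_franchise_venue_py
  exact resolve_eq query vc
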